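-- pv_equiv track=rewrite | github.com/Rurik-Vaeringjar/MCP | tools/useful_functions.py | add_links
-- ===== SOURCE A (Python) =====
-- def add_links(msg, url):
-- 	first_part = msg.partition('[')
-- 	second_part = first_part[2].partition(']')
--
-- 	link = capitalize_words(second_part[0])
-- 	link = link.replace(" ", "_")
--
-- 	link = f"({url}{link})"
--
-- 	ass = second_part[2]
-- 	if "[" in ass and "]" in ass:
-- 		ass = add_links(ass, url)
--
-- 	return first_part[0]+first_part[1]+second_part[0]+second_part[1]+link+ass
--
-- def capitalize_words(str_:str):
-- 	words = str_.split(" ")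
-- 	restr = ""
-- 	for word in words:
-- 		word = word.capitalize()
-- 		restr += f"{word} "
-- 	restr = restr[0:len(restr)-1]
--
-- 	return restr
-- ===== SOURCE B (Python) =====
-- def capitalize_words(str_: str):
-- 	return " ".join(w.capitalize() for w in str_.split(" "))
--
-- def add_links(msg, url):
-- 	pieces = []
-- 	rest = msg
-- 	while True:
-- 		i = rest.find('[')
-- 		head, opened, after = (rest, '', '') if i < 0 else (rest[:i], '[', rest[i+1:])
-- 		j = after.find(']')
-- 		inside, closed, tail = (after, '', '') if j < 0 else (after[:j], ']', after[j+1:])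
-- 		pieces.append(head + opened + inside + closed
-- 		              + "(" + url + capitalize_words(inside).replace(" ", "_") + ")")
-- 		if '[' not in tail or ']' not in tail:
-- 			pieces.append(tail)
-- 			return "".join(pieces)
-- 		rest = tail
-- ===== Notes on version B (the rewrite author's own statement) =====
-- stated objective: alternative
-- what changed: Replaces A's self-recursion over partition() and repeated string concatenation by an iterative find()/slice loop that appends each rendered segment to a list joined once at the end, and rewrites capitalize_words as a split/map/' '.join one-liner.
import Mathlib
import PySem

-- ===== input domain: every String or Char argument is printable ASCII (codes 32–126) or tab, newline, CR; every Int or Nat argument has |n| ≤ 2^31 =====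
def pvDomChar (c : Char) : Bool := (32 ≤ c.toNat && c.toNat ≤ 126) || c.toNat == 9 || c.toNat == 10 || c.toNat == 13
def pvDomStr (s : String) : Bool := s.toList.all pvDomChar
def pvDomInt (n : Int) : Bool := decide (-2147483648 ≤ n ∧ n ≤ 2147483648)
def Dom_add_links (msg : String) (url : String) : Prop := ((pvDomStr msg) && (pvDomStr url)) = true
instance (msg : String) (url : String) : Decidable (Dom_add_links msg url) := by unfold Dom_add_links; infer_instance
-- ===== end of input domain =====

-- B replaces A's self-recursion (partition + string concatenation) by a find/slice index loop that
-- collects the rendered segments in a list joined once at the end, with capitalize_words rewritten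
-- as a split/map/join one-liner (alternative decomposition, same cost); return values proved equal.


-- ===== PORT A =====
-- Python `s.partition(sep)` for a ONE-character separator (the only form A uses):
-- splits at the FIRST occurrence, `(s, '', '')` when absent — exact.
def pyPartition1 : List Char → Char → List Char × List Char × List Char
  | [], _ => ([], [], [])
  | c :: rest, sep =>
    if c = sep then ([], [sep], rest)
    else
      let p := pyPartition1 rest sep
      (c :: p.1, p.2.1, p.2.2)

-- Python `word.capitalize()` (exact on the stated ASCII domain: first char uppercased, rest lowered);
-- used by both ports since both Pythons call str.capitalize.
def pyCapitalize : List Char → List Char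
  | [] => []
  | c :: rest => PySem.Chars.upperChar c :: PySem.Chars.lower rest

-- A's `capitalize_words`: split on ' ', fold appending "word + ' '", drop the trailing char by slicing.
def capitalize_words (str_ : List Char) : List Char :=
  let words := PySem.Chars.splitOn str_ [' ']
  let restr := words.foldl (fun restr word => restr ++ (pyCapitalize word ++ [' '])) []
  PySem.List.slice restr (some 0) (some ((restr.length : Int) - 1))

-- termination helper for A's recursion: the leftover after the two partitions is shorter (or empty).
theorem pyPartition1_after_len (cs : List Char) (sep : Char) :
    (pyPartition1 cs sep).2.2.length < cs.length ∨ (pyPartition1 cs sep).2.2 = [] := by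
  induction cs with
  | nil => right; rfl
  | cons c rest ih =>
    by_cases h : c = sep
    · left; simp [pyPartition1, h]
    · rcases ih with h' | h'
      · left; simp only [pyPartition1, if_neg h]; simpa using Nat.lt_succ_of_lt h'
      · right; simp only [pyPartition1, if_neg h]; exact h'

theorem pyPartition1_nested_len (cs : List Char)
    (h : (pyPartition1 (pyPartition1 cs '[').2.2 ']').2.2 ≠ []) :
    (pyPartition1 (pyPartition1 cs '[').2.2 ']').2.2.length < cs.length := by
  rcases pyPartition1_after_len (pyPartition1 cs '[').2.2 ']' with h2 | h2
  · rcases pyPartition1_after_len cs '[' with h1 | h1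
    · omega
    · exfalso; apply h; rw [h1]; rfl
  · exact absurd h2 h

theorem cond_ne_nil {ass : List Char}
    (h : (PySem.Chars.isIn ['['] ass && PySem.Chars.isIn [']'] ass) = true) : ass ≠ [] := by
  intro he; subst he; simp at h; exact absurd h.1 (by decide)

-- A's recursion, transliterated (tuple projections as in the Python).
def addLinksRec (cs : List Char) (url : List Char) : List Char :=
  let first_part := pyPartition1 cs '['
  let second_part := pyPartition1 first_part.2.2 ']'
  let link := capitalize_words second_part.1
  let link := PySem.Chars.replace link [' '] ['_']
  let link := ['('] ++ url ++ link ++ [')']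
  let ass := second_part.2.2
  let ass :=
    if h : (PySem.Chars.isIn ['['] ass && PySem.Chars.isIn [']'] ass) = true then
      addLinksRec ass url
    else ass
  first_part.1 ++ first_part.2.1 ++ second_part.1 ++ second_part.2.1 ++ link ++ ass
termination_by cs.length
decreasing_by exact pyPartition1_nested_len cs (cond_ne_nil h)

def add_links (msg : String) (url : String) : String :=
  String.ofList (addLinksRec msg.toList url.toList)

-- ===== PORT B =====
-- B's `capitalize_words`: one-liner ' '.join(w.capitalize() for w in str_.split(' ')).
def capitalize_words_alt (str_ : List Char) : List Char :=
  PySem.Chars.join [' '] ((PySem.Chars.splitOn str_ [' ']).map pyCapitalize)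

-- B's splitter: `i = rest.find(sep)` then slicing, `(rest, '', '')` when i < 0 — Source B's code.
def splitAt1 (cs : List Char) (sep : Char) : List Char × List Char × List Char :=
  let i := PySem.Chars.find cs [sep]
  if i < 0 then (cs, [], [])
  else (PySem.List.slice cs none (some i), [sep], PySem.List.slice cs (some (i + 1)) none)

-- termination helper for B's loop (independent of A's helpers): the tail is shorter (or empty).
theorem splitAt1_after_len (cs : List Char) (sep : Char) :
    (splitAt1 cs sep).2.2.length < cs.length ∨ (splitAt1 cs sep).2.2 = [] := by
  unfold splitAt1
  by_cases h : PySem.Chars.find cs [sep] < 0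
  · right; simp [h]
  · cases cs with
    | nil => right; simp [h, PySem.List.slice]
    | cons c rest =>
      left
      simp only [if_neg h]
      rw [PySem.List.slice_from _ (by omega)]
      simp only [List.length_drop]
      have : 1 ≤ (PySem.Chars.find (c :: rest) [sep] + 1).toNat := by omega
      simp only [List.length_cons]
      omega

theorem splitAt1_cond_ne_nil {tail : List Char}
    (h : ¬ ((!PySem.Chars.isIn ['['] tail || !PySem.Chars.isIn [']'] tail) = true)) : tail ≠ [] := by
  intro he; subst he; simp [PySem.Chars.isIn] at h
  exact absurd h.1 (by decide)

theorem splitAt1_nested_len (cs : List Char)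
    (h : (splitAt1 (splitAt1 cs '[').2.2 ']').2.2 ≠ []) :
    (splitAt1 (splitAt1 cs '[').2.2 ']').2.2.length < cs.length := by
  rcases splitAt1_after_len (splitAt1 cs '[').2.2 ']' with h2 | h2
  · rcases splitAt1_after_len cs '[' with h1 | h1
    · omega
    · exfalso; apply h; rw [h1]; rfl
  · exact absurd h2 h

-- Source B's while-loop: `pieces` is the list accumulator, `rest` the remaining text; join at the end.
def linkPieces (rest : List Char) (url : List Char) (pieces : List (List Char)) : List (List Char) :=
  let s1 := splitAt1 rest '['
  let head := s1.1; let opened := s1.2.1; let after := s1.2.2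
  let s2 := splitAt1 after ']'
  let inside := s2.1; let closed := s2.2.1; let tail := s2.2.2
  let pieces := pieces ++ [head ++ opened ++ inside ++ closed ++ ['('] ++ url ++
      PySem.Chars.replace (capitalize_words_alt inside) [' '] ['_'] ++ [')']]
  if h : (!PySem.Chars.isIn ['['] tail || !PySem.Chars.isIn [']'] tail) = true then
    pieces ++ [tail]
  else
    linkPieces tail url pieces
termination_by rest.length
decreasing_by exact splitAt1_nested_len rest (splitAt1_cond_ne_nil h)

def add_links_alt (msg : String) (url : String) : String :=
  String.ofList (PySem.Chars.join [] (linkPieces msg.toList url.toList []))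

-- ===== PRECONDITION & SPEC =====
def Spec_add_links (msg : String) (url : String) (out : String) : Prop := out = add_links_alt msg url
instance (msg : String) (url : String) (out : String) : Decidable (Spec_add_links msg url out) := by unfold Spec_add_links; infer_instance

-- ===== CLAIM (what is proved, stated in full; the proofs are below) =====
def Claim_equal_add_links : Prop := ∀ (msg : String) (url : String), Dom_add_links msg url → Spec_add_links msg url (add_links msg url)

-- ===== LEMMAS AND PROOFS =====
-- `find.go` never returns a value below its starting offset other than -1.
theorem findgo_ge (sub : List Char) : ∀ (cs : List Char) (k : Nat),
    PySem.Chars.find.go sub cs k = -1 ∨ (k : Int) ≤ PySem.Chars.find.go sub cs k := by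
  intro cs
  induction cs with
  | nil =>
    intro k
    by_cases h : sub.isEmpty = true
    · right; simp [PySem.Chars.find.go, h]
    · left; simp [PySem.Chars.find.go, h]
  | cons c t ih =>
    intro k
    by_cases h : sub.isPrefixOf (c :: t) = true
    · right; simp [PySem.Chars.find.go, h]
    · rcases ih (k + 1) with h' | h'
      · left; simpa [PySem.Chars.find.go, h] using h'
      · right; simp only [PySem.Chars.find.go, h, if_false]
        have : (k : Int) ≤ ((k + 1 : Nat) : Int) := by push_cast; omega
        exact le_trans this h'

-- shifting the starting offset shifts the result (or keeps -1).
theorem findgo_shift (sub : List Char) : ∀ (cs : List Char) (k : Nat),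
    PySem.Chars.find.go sub cs k =
      (if PySem.Chars.find.go sub cs 0 = -1 then -1 else PySem.Chars.find.go sub cs 0 + k) := by
  intro cs
  induction cs with
  | nil =>
    intro k
    by_cases h : sub.isEmpty = true
    · simp [PySem.Chars.find.go, h]
    · simp [PySem.Chars.find.go, h]
  | cons c t ih =>
    intro k
    by_cases h : sub.isPrefixOf (c :: t) = true
    · simp [PySem.Chars.find.go, h]
    · rw [show PySem.Chars.find.go sub (c :: t) k = PySem.Chars.find.go sub t (k + 1) from by
            simp [PySem.Chars.find.go, h],
          show PySem.Chars.find.go sub (c :: t) 0 = PySem.Chars.find.go sub t 1 from by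
            simp [PySem.Chars.find.go, h]]
      rw [ih (k + 1), ih 1]
      by_cases h0 : PySem.Chars.find.go sub t 0 = -1
      · simp [h0]
      · rcases findgo_ge sub t 0 with h' | h'
        · exact absurd h' h0
        · have hne : ¬ (PySem.Chars.find.go sub t 0 + ((1 : Nat) : Int) = -1) := by
            push_cast; omega
          simp only [if_neg h0, if_neg hne]
          push_cast; ring

-- Python find on a cons, for a one-character needle.
theorem find_cons (c : Char) (rest : List Char) (sep : Char) :
    PySem.Chars.find (c :: rest) [sep] =
      (if c = sep then 0
       else if PySem.Chars.find rest [sep] = -1 then -1 else PySem.Chars.find rest [sep] + 1) := by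
  unfold PySem.Chars.find
  rw [PySem.Chars.find.go]
  have hpre : [sep].isPrefixOf (c :: rest) = (sep == c) := by
    simp [List.isPrefixOf]
  rw [hpre, findgo_shift [sep] rest 1]
  by_cases h : c = sep
  · simp [h]
  · have : (sep == c) = false := by simp [beq_iff_eq]; exact fun he => h he.symm
    simp [this, h]

-- B's find/slice splitter computes exactly A's partition.
theorem splitAt1_eq (cs : List Char) (sep : Char) : splitAt1 cs sep = pyPartition1 cs sep := by
  induction cs with
  | nil =>
    simp [splitAt1, pyPartition1, PySem.Chars.find, PySem.Chars.find.go]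
  | cons c rest ih =>
    unfold splitAt1
    rw [find_cons]
    by_cases hc : c = sep
    · rw [if_pos hc, if_neg (by norm_num)]
      have e1 : ((0 : Int) + 1) = ((1 : Nat) : Int) := by norm_num
      rw [e1, PySem.List.slice_from_natCast, PySem.List.slice_to _ (le_refl 0)]
      simp [pyPartition1, hc]
    · rw [if_neg hc]
      by_cases hf : PySem.Chars.find rest [sep] = -1
      · rw [if_pos hf, if_pos (by norm_num)]
        have hrest : pyPartition1 rest sep = (rest, [], []) := by
          rw [← ih]; simp [splitAt1, hf]
        simp [pyPartition1, hc, hrest]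
      · have hge : (0 : Int) ≤ PySem.Chars.find rest [sep] := by
          rcases findgo_ge [sep] rest 0 with h' | h'
          · exact absurd h' hf
          · simpa using h'
        obtain ⟨n, hn⟩ : ∃ n : Nat, PySem.Chars.find rest [sep] = (n : Int) :=
          ⟨(PySem.Chars.find rest [sep]).toNat, (Int.toNat_of_nonneg hge).symm⟩
        rw [if_neg hf, hn, if_neg (by omega)]
        have e1 : ((n : Int) + 1) = ((n + 1 : Nat) : Int) := by push_cast; ring
        have e2 : (((n + 1 : Nat) : Int) + 1) = ((n + 2 : Nat) : Int) := by push_cast; ring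
        rw [e1, e2, PySem.List.slice_to_natCast, PySem.List.slice_from_natCast]
        have hrest : pyPartition1 rest sep = (rest.take n, [sep], rest.drop (n + 1)) := by
          rw [← ih]
          unfold splitAt1
          rw [hn, if_neg (by omega), e1, PySem.List.slice_to_natCast, PySem.List.slice_from_natCast]
        simp [pyPartition1, hc, hrest, List.take_succ_cons, List.drop_succ_cons]

-- join with the empty separator is flatten.
theorem join_nil_sep (parts : List (List Char)) : PySem.Chars.join [] parts = parts.flatten := by
  induction parts with
  | nil => simp [PySem.Chars.join_nil]
  | cons x t ih =>
    cases t with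
    | nil => simp [PySem.Chars.join_singleton]
    | cons y tt => rw [PySem.Chars.join_cons_cons, ih]; simp

-- dropping the trailing space from the concatenation of "word + ' '" blocks is ' '.join.
theorem flatten_space_dropLast : ∀ (parts : List (List Char)), parts ≠ [] →
    ((parts.map (fun w => w ++ [' '])).flatten).dropLast = PySem.Chars.join [' '] parts := by
  intro parts
  induction parts with
  | nil => intro h; exact absurd rfl h
  | cons x t ih =>
    intro _
    cases t with
    | nil => simp [PySem.Chars.join_singleton, List.dropLast_concat]
    | cons y tt =>
      have hne : (((y :: tt).map (fun w => w ++ [' '])).flatten) ≠ [] := by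
        simp
      rw [List.map_cons, List.flatten_cons, List.dropLast_append_of_ne_nil hne,
          ih (by simp), PySem.Chars.join_cons_cons]

-- Python's str.split(sep) never returns the empty list.
theorem splitOnGo_ne_nil (sep : List Char) : ∀ (fuel : Nat) (l cur : List Char) (acc : List (List Char)),
    PySem.Chars.splitOn.go sep fuel l cur acc ≠ [] := by
  intro fuel
  induction fuel with
  | zero => intro l cur acc; simp [PySem.Chars.splitOn.go]
  | succ m ih =>
    intro l cur acc
    cases l with
    | nil => simp [PySem.Chars.splitOn.go]
    | cons c rest =>
      simp only [PySem.Chars.splitOn.go]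
      split_ifs
      · exact ih _ _ _
      · exact ih _ _ _

theorem splitOn_ne_nil (s : List Char) : PySem.Chars.splitOn s [' '] ≠ [] := by
  simp only [PySem.Chars.splitOn]
  exact splitOnGo_ne_nil _ _ _ _ _

-- the two capitalize_words versions agree.
theorem cap_eq (s : List Char) : capitalize_words_alt s = capitalize_words s := by
  unfold capitalize_words_alt capitalize_words
  dsimp only
  rw [PySem.List.foldl_append_eq_flatMap]
  have hmap : List.flatMap (fun word => pyCapitalize word ++ [' ']) (PySem.Chars.splitOn s [' '])
      = (((PySem.Chars.splitOn s [' ']).map pyCapitalize).map (fun w => w ++ [' '])).flatten := by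
    simp [List.flatMap, Function.comp_def]
  rw [List.nil_append, hmap]
  set parts := (PySem.Chars.splitOn s [' ']).map pyCapitalize with hp
  have hpne : parts ≠ [] := by
    simp [hp]; exact splitOn_ne_nil s
  set restr := ((parts.map (fun w => w ++ [' '])).flatten) with hr
  have hlen : 1 ≤ restr.length := by
    rcases List.exists_cons_of_ne_nil hpne with ⟨a, t, hat⟩
    simp [hr, hat]; omega
  rw [PySem.List.slice_zero_start, PySem.List.slice_to _ (by push_cast; omega)]
  have : ((restr.length : Int) - 1).toNat = restr.length - 1 := by omega
  rw [this, ← List.dropLast_eq_take, flatten_space_dropLast parts hpne]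

-- loop invariant: joining the accumulated pieces then running on is A's recursion.
theorem linkPieces_eq (n : Nat) : ∀ (cs : List Char), cs.length < n → ∀ (url : List Char) (pieces : List (List Char)),
    PySem.Chars.join [] (linkPieces cs url pieces) =
      PySem.Chars.join [] pieces ++ addLinksRec cs url := by
  induction n with
  | zero => intro cs h; omega
  | succ n ih =>
    intro cs h url pieces
    rw [linkPieces, addLinksRec]
    simp only [splitAt1_eq, cap_eq]
    by_cases hc : (PySem.Chars.isIn ['['] (pyPartition1 (pyPartition1 cs '[').2.2 ']').2.2 &&
        PySem.Chars.isIn [']'] (pyPartition1 (pyPartition1 cs '[').2.2 ']').2.2) = true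
    · have hb : (!PySem.Chars.isIn ['['] (pyPartition1 (pyPartition1 cs '[').2.2 ']').2.2 ||
          !PySem.Chars.isIn [']'] (pyPartition1 (pyPartition1 cs '[').2.2 ']').2.2) = false := by
        rw [← Bool.not_and, hc]; rfl
      simp only [hb, Bool.false_eq_true, dif_neg, not_false_iff, dif_pos hc]
      rw [ih _ (by
            have := pyPartition1_nested_len cs (cond_ne_nil hc); omega)]
      simp only [join_nil_sep]
      simp [List.append_assoc]
    · have hb : (!PySem.Chars.isIn ['['] (pyPartition1 (pyPartition1 cs '[').2.2 ']').2.2 ||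
          !PySem.Chars.isIn [']'] (pyPartition1 (pyPartition1 cs '[').2.2 ']').2.2) = true := by
        rw [← Bool.not_and]
        simp [hc]
      simp only [hb, dif_pos, dif_neg hc]
      simp only [join_nil_sep]
      simp [List.append_assoc]

-- ===== VERDICT (by name: the statement is the Claim_ definition above) =====
theorem add_links_spec : Claim_equal_add_links := by
  intro msg url _
  unfold Spec_add_links add_links add_links_alt
  rw [linkPieces_eq (msg.toList.length + 1) msg.toList (by omega)]
  simp [PySem.Chars.join_nil]
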